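-- pv_equiv track=rewrite | github.com/jdevey/Twitter-Sentiment-Analysis-Using-Tweepy | main.py | build_frequencies
-- ===== SOURCE A (Python) =====
-- from collections import defaultdict
--
-- def build_frequencies(tweets):
--     word_freq = {}
--     for tweet in tweets:
--         for i in range(len(tweet)):
--             if (tweet[i] in word_freq):
--                 word_freq[tweet[i]] += 1
--             else:
--                 word_freq[tweet[i]] = 1
--     word_mtr = defaultdict(lambda : defaultdict(int))
--
--     for tweet in tweets:
--         for i in range(len(tweet)):
--             for j in range(i):
--                 w1, w2 = sorted((tweet[i], tweet[j]))
--                 if w1 != w2: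
--                     word_mtr[w1][w2] += 1
--     return (word_freq, word_mtr)
-- ===== SOURCE B (Python) =====
-- from collections import defaultdict, Counter
--
-- def build_frequencies(tweets):
--     word_freq = dict(Counter(w for tweet in tweets for w in tweet))
--     word_mtr = defaultdict(lambda: defaultdict(int))
--     for tweet in tweets:
--         seen = {}
--         for w in tweet:
--             for v, c in seen.items():
--                 if v != w:
--                     if v < w:
--                         word_mtr[v][w] += c
--                     else:
--                         word_mtr[w][v] += c
--             seen[w] = seen.get(w, 0) + 1
--     return (word_freq, word_mtr)
-- ===== Notes on version B (the rewrite author's own statement) =====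
-- stated objective: alternative
-- what changed: word_freq is built with one Counter over the flattened word stream instead of nested index loops with a membership test, and word_mtr replaces the position-pair inner loop with a single pass per tweet that keeps a running count table of earlier words and, at each word, adds the stored count for every distinct earlier word (aggregating duplicate positions into one increment).
import Mathlib
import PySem

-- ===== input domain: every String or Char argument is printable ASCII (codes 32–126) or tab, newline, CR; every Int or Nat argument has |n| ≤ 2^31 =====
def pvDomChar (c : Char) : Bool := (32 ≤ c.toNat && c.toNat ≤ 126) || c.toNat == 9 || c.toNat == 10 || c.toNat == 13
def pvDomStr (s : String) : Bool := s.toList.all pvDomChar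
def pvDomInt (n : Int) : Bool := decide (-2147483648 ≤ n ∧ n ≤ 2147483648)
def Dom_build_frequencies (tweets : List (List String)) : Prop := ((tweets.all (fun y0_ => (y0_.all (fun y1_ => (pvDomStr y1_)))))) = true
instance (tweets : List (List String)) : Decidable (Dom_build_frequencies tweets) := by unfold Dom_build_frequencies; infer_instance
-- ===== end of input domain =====

-- B builds word_freq with one Counter over the flattened word stream and word_mtr with a
-- per-tweet running count table of earlier words (one aggregated increment per distinct
-- earlier word) instead of A's position-pair inner loop; same value, same insertion order.

-- ===== PORT A =====
def build_frequencies (tweets : List (List String)) :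
    (List (String × Int)) × (List (String × List (String × Int))) :=
  let word_freq : PySem.Dict String Int :=
    tweets.foldl (fun wf tweet =>
      (PySem.List.pyRange 0 (PySem.List.len tweet)).foldl (fun wf i =>
        if wf.contains (PySem.List.pyGetD tweet i "") then
          wf.insert (PySem.List.pyGetD tweet i "") (wf.getD (PySem.List.pyGetD tweet i "") 0 + 1)
        else
          wf.insert (PySem.List.pyGetD tweet i "") 1) wf) PySem.Dict.empty
  let word_mtr : PySem.Dict String (PySem.Dict String Int) :=
    tweets.foldl (fun m tweet =>
      (PySem.List.pyRange 0 (PySem.List.len tweet)).foldl (fun m i =>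
        (PySem.List.pyRange 0 i).foldl (fun m j =>
          -- w1, w2 = sorted((tweet[i], tweet[j]))  (stable two-element sort)
          let a := PySem.List.pyGetD tweet i ""
          let b := PySem.List.pyGetD tweet j ""
          let w1 := if a ≤ b then a else b
          let w2 := if a ≤ b then b else a
          if w1 ≠ w2 then m.modify w1 PySem.Dict.empty (fun r => r.modify w2 0 (· + 1)) else m) m) m)
      PySem.Dict.empty
  (word_freq.items, word_mtr.items.map (fun p => (p.1, p.2.items)))

-- ===== PORT B =====
def build_frequencies_alt (tweets : List (List String)) :
    (List (String × Int)) × (List (String × List (String × Int))) :=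
  let word_freq : PySem.Dict String Int := PySem.Dict.counter (tweets.flatMap (fun t => t))
  let word_mtr : PySem.Dict String (PySem.Dict String Int) :=
    tweets.foldl (fun m tweet =>
      (tweet.foldl (fun (st : PySem.Dict String (PySem.Dict String Int) × PySem.Dict String Int) w =>
        (st.2.items.foldl (fun m vc =>
            if vc.1 ≠ w then
              if vc.1 < w then m.modify vc.1 PySem.Dict.empty (fun r => r.modify w 0 (· + vc.2))
              else m.modify w PySem.Dict.empty (fun r => r.modify vc.1 0 (· + vc.2))
            else m) st.1,
         st.2.insert w (st.2.getD w 0 + 1))) (m, PySem.Dict.empty)).1) PySem.Dict.empty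
  (word_freq.items, word_mtr.items.map (fun p => (p.1, p.2.items)))

-- ===== PRECONDITION & SPEC =====
def Spec_build_frequencies (tweets : List (List String)) (out : (List (String × Int)) × (List (String × List (String × Int)))) : Prop := out = build_frequencies_alt tweets
instance (tweets : List (List String)) (out : (List (String × Int)) × (List (String × List (String × Int)))) : Decidable (Spec_build_frequencies tweets out) := by unfold Spec_build_frequencies; infer_instance

-- ===== CLAIM (what is proved, stated in full; the proofs are below) =====
def Claim_equal_build_frequencies : Prop := ∀ (tweets : List (List String)), Dom_build_frequencies tweets → Spec_build_frequencies tweets (build_frequencies tweets)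

-- ===== LEMMAS AND PROOFS =====

-- the nested-dict matrix type
abbrev MT : Type := PySem.Dict String (PySem.Dict String Int)

-- one defaultdict increment word_mtr[k.1][k.2] += n
def bumpM (m : MT) (k : String × String) (n : Int) : MT :=
  m.modify k.1 PySem.Dict.empty (fun r => r.modify k.2 0 (· + n))

-- the sorted pair (w = later word, v = earlier word)
def keyP (w v : String) : String × String := if w ≤ v then (w, v) else (v, w)

-- both coordinates of k are already keys of m
def PM (m : MT) (k : String × String) : Prop :=
  m.contains k.1 = true ∧ (m.getD k.1 PySem.Dict.empty).contains k.2 = true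

-- process one position: unit bumps against every earlier position
def pairsFold (m : MT) (w : String) (p : List String) : MT :=
  p.foldl (fun m v => if v ≠ w then bumpM m (keyP w v) 1 else m) m

-- bump by c at an existing position, skipping a zero amount
def addAmt (e : MT) (k : String × String) (c : Int) : MT := if c = 0 then e else bumpM e k c

-- process the rest of a tweet, p = prefix already seen
def mtrGo : List String → List String → MT → MT
  | _, [], m => m
  | p, w :: ws, m => mtrGo (p ++ [w]) ws (pairsFold m w p)

-- ---- generic Dict facts ----

theorem dict_get?_of_not_contains {κ ν : Type} [BEq κ] [LawfulBEq κ] (d : PySem.Dict κ ν) (k : κ)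
    (h : d.contains k = false) : d.get? k = none := by
  simp only [PySem.Dict.contains, List.any_eq_false] at h
  simp only [PySem.Dict.get?, Option.map_eq_none_iff]
  rw [List.find?_eq_none]
  intro p hp
  exact fun hb => (h p hp) hb

theorem dict_getD_of_not_contains {κ ν : Type} [BEq κ] [LawfulBEq κ] (d : PySem.Dict κ ν) (k : κ)
    (dflt : ν) (h : d.contains k = false) : d.getD k dflt = dflt := by
  simp [PySem.Dict.getD, dict_get?_of_not_contains d k h]

theorem dict_insert_eq_map {κ ν : Type} [BEq κ] (d : PySem.Dict κ ν) (k : κ) (v : ν)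
    (hc : d.contains k = true) :
    d.insert k v = PySem.Dict.mk (d.items.map (fun p => if p.1 == k then (k, v) else p)) := by
  simp [PySem.Dict.insert, hc]

theorem dict_insert_eq_append {κ ν : Type} [BEq κ] (d : PySem.Dict κ ν) (k : κ) (v : ν)
    (hc : d.contains k = false) :
    d.insert k v = PySem.Dict.mk (d.items ++ [(k, v)]) := by
  simp [PySem.Dict.insert, hc]

theorem dict_insert_comm_of_contains {κ ν : Type} [BEq κ] [LawfulBEq κ] (d : PySem.Dict κ ν)
    (k k' : κ) (v v' : ν) (hne : k ≠ k') (hc : d.contains k = true) :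
    (d.insert k v).insert k' v' = (d.insert k' v').insert k v := by
  have hkk' : (k == k') = false := by simp [hne]
  have hk'k : (k' == k) = false := by simp [Ne.symm hne]
  have h2 : (d.insert k' v').contains k = true := by
    rw [PySem.Dict.contains_insert]; simp [hc]
  cases h' : d.contains k' with
  | true =>
    have h1 : (d.insert k v).contains k' = true := by
      rw [PySem.Dict.contains_insert]; simp [h']
    rw [dict_insert_eq_map _ _ _ h1, dict_insert_eq_map _ _ _ hc,
        dict_insert_eq_map _ _ _ h2, dict_insert_eq_map _ _ _ h']
    simp only [List.map_map]
    congr 1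
    apply List.map_congr_left
    intro p _
    rcases p with ⟨a, b⟩
    by_cases hak : a = k <;> by_cases hak' : a = k' <;>
      simp [Function.comp, hak, hak', hkk', hk'k]
  | false =>
    have h1 : (d.insert k v).contains k' = false := by
      rw [PySem.Dict.contains_insert]; simp [h', hk'k]
    rw [dict_insert_eq_append _ _ _ h1, dict_insert_eq_map _ _ _ hc,
        dict_insert_eq_map _ _ _ h2, dict_insert_eq_append _ _ _ h']
    simp [List.map_append, hk'k]

theorem dict_modify_modify_self {κ ν : Type} [BEq κ] [LawfulBEq κ] (d : PySem.Dict κ ν)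
    (k : κ) (z : ν) (f g : ν → ν) :
    (d.modify k z f).modify k z g = d.modify k z (fun x => g (f x)) := by
  simp [PySem.Dict.modify, PySem.Dict.getD_insert_self, PySem.Dict.insert_insert_self]

theorem dict_modify_congr_val {κ ν : Type} [BEq κ] [LawfulBEq κ] (d : PySem.Dict κ ν) (k : κ)
    (z : ν) (f g : ν → ν) (h : f (d.getD k z) = g (d.getD k z)) :
    d.modify k z f = d.modify k z g := by
  simp [PySem.Dict.modify, h]

theorem dict_modify_comm_of_contains {κ ν : Type} [BEq κ] [LawfulBEq κ] (d : PySem.Dict κ ν)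
    (k k' : κ) (z z' : ν) (f g : ν → ν) (hne : k ≠ k') (hc : d.contains k = true) :
    (d.modify k z f).modify k' z' g = (d.modify k' z' g).modify k z f := by
  simp only [PySem.Dict.modify]
  rw [PySem.Dict.getD_insert_of_ne _ _ _ (Ne.symm hne), PySem.Dict.getD_insert_of_ne _ _ _ hne]
  exact dict_insert_comm_of_contains d k k' _ _ hne hc

-- ---- bump facts ----

theorem bump_merge (m : MT) (k : String × String) (x y : Int) :
    bumpM (bumpM m k x) k y = bumpM m k (x + y) := by
  unfold bumpM
  rw [dict_modify_modify_self]
  congr 1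
  funext r
  rw [dict_modify_modify_self]
  congr 1
  funext t
  ring

theorem bump_PM_self (m : MT) (k : String × String) (n : Int) : PM (bumpM m k n) k := by
  constructor
  · simp [bumpM, PySem.Dict.modify]
  · simp only [bumpM]
    rw [PySem.Dict.getD_modify_self]
    simp [PySem.Dict.modify]

theorem bump_PM_mono (m : MT) (k k' : String × String) (n : Int) (h : PM m k) :
    PM (bumpM m k' n) k := by
  obtain ⟨h1, h2⟩ := h
  constructor
  · simp [bumpM, PySem.Dict.modify, PySem.Dict.contains_insert, h1]
  · by_cases hk : k.1 = k'.1
    · simp only [bumpM, ← hk]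
      rw [PySem.Dict.getD_modify_self]
      simp [PySem.Dict.modify, PySem.Dict.contains_insert, h2]
    · simp only [bumpM]
      rw [PySem.Dict.getD_modify_of_ne _ _ _ hk]
      exact h2

theorem bump_comm (m : MT) (k k' : String × String) (x y : Int) (hne : k ≠ k') (h : PM m k) :
    bumpM (bumpM m k x) k' y = bumpM (bumpM m k' y) k x := by
  by_cases h1 : k.1 = k'.1
  · have h2 : k.2 ≠ k'.2 := fun h2 => hne (Prod.ext h1 h2)
    unfold bumpM
    rw [← h1, dict_modify_modify_self, dict_modify_modify_self]
    apply dict_modify_congr_val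
    exact dict_modify_comm_of_contains _ k.2 k'.2 0 0 _ _ h2 h.2
  · unfold bumpM
    exact dict_modify_comm_of_contains m k.1 k'.1 _ _ _ _ h1 h.1

theorem keyP_inj (w v v' : String) (hv : v ≠ w) (hv' : v' ≠ w) (h : keyP w v = keyP w v') :
    v = v' := by
  unfold keyP at h
  split_ifs at h with h1 h2 h2 <;> simp only [Prod.mk.injEq] at h
  · exact h.2
  · exact absurd h.2 hv
  · exact absurd h.1 hv
  · exact h.1

theorem addAmt_bump (m : MT) (k : String × String) (a c : Int) :
    addAmt (bumpM m k a) k c = bumpM m k (a + c) := by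
  unfold addAmt
  by_cases hc : c = 0
  · simp [hc]
  · rw [if_neg hc, bump_merge]

-- pull all later bumps at an existing key k into one amount at its current position
theorem bump_fold_pull (w : String) (l : List String) : ∀ (e : MT) (k : String × String), PM e k →
    l.foldl (fun m v => bumpM m (keyP w v) 1) e
    = (l.filter (fun v => keyP w v ≠ k)).foldl (fun m v => bumpM m (keyP w v) 1)
        (addAmt e k (l.countP (fun v => keyP w v = k) : Int)) := by
  induction l with
  | nil =>
    intro e k _
    simp [addAmt]
  | cons u l' ih =>
    intro e k hPM
    by_cases hu : keyP w u = k
    · rw [List.foldl_cons, hu, ih (bumpM e k 1) k (bump_PM_self e k 1), addAmt_bump]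
      have hc1 : (u :: l').countP (fun v => decide (keyP w v = k))
          = l'.countP (fun v => decide (keyP w v = k)) + 1 := by
        rw [List.countP_cons]; simp [hu]
      have hf1 : (u :: l').filter (fun v => decide (keyP w v ≠ k))
          = l'.filter (fun v => decide (keyP w v ≠ k)) := by
        rw [List.filter_cons]; simp [hu]
      rw [hc1, hf1]
      unfold addAmt
      rw [if_neg (by push_cast; omega)]
      congr 1
      push_cast; ring
    · rw [List.foldl_cons, ih (bumpM e (keyP w u) 1) k (bump_PM_mono e k (keyP w u) 1 hPM)]
      have hc1 : (u :: l').countP (fun v => decide (keyP w v = k))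
          = l'.countP (fun v => decide (keyP w v = k)) := by
        rw [List.countP_cons]; simp [hu]
      have hf1 : (u :: l').filter (fun v => decide (keyP w v ≠ k))
          = u :: l'.filter (fun v => decide (keyP w v ≠ k)) := by
        rw [List.filter_cons]; simp [hu]
      rw [hc1, hf1, List.foldl_cons]
      congr 1
      unfold addAmt
      by_cases hc : (l'.countP (fun v => decide (keyP w v = k)) : Int) = 0
      · simp [hc]
      · rw [if_neg hc, if_neg hc]
        exact (bump_comm e k (keyP w u) _ 1 (Ne.symm hu) hPM).symm

-- ---- Set.ofList (ordered dedup) facts ----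

theorem set_add_cons (s : List String) (v x : String) (hx : x ≠ v) :
    PySem.Set.add (v :: s) x = v :: PySem.Set.add s x := by
  unfold PySem.Set.add
  have hcc : PySem.Set.contains (v :: s) x = PySem.Set.contains s x := by
    simp [PySem.Set.contains, hx]
  rw [hcc]
  by_cases hc : PySem.Set.contains s x = true
  · rw [if_pos hc, if_pos hc]
  · rw [if_neg hc, if_neg hc]
    rfl

theorem set_foldl_cons (l : List String) : ∀ (s : List String) (v : String),
    List.foldl PySem.Set.add (v :: s) l
    = v :: List.foldl PySem.Set.add s (l.filter (fun x => x ≠ v)) := by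
  induction l with
  | nil => intro s v; simp
  | cons x l' ih =>
    intro s v
    rw [List.foldl_cons, List.filter_cons]
    by_cases hx : x = v
    · have h1 : PySem.Set.add (v :: s) x = v :: s := by
        subst hx; simp [PySem.Set.add, PySem.Set.contains]
      have h2 : (decide (x ≠ v)) = false := by simp [hx]
      rw [h1, h2]
      simp only [Bool.false_eq_true, if_false]
      exact ih s v
    · have h2 : (decide (x ≠ v)) = true := by simp [hx]
      rw [set_add_cons s v x hx, h2]
      simp only [if_true]
      rw [List.foldl_cons]
      exact ih (PySem.Set.add s x) v

theorem ofList_cons (v : String) (rest : List String) :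
    PySem.Set.ofList (v :: rest) = v :: PySem.Set.ofList (rest.filter (fun x => x ≠ v)) := by
  show List.foldl PySem.Set.add PySem.Set.empty (v :: rest) = _
  have h1 : PySem.Set.add PySem.Set.empty v = [v] := by
    simp [PySem.Set.add, PySem.Set.empty, PySem.Set.contains]
  rw [List.foldl_cons, h1]
  exact set_foldl_cons rest [] v

theorem ofList_filter (q : String → Bool) : ∀ (n : Nat) (p : List String), p.length ≤ n →
    (PySem.Set.ofList p).filter q = PySem.Set.ofList (p.filter q) := by
  intro n
  induction n with
  | zero =>
    intro p hp
    rw [List.length_eq_zero_iff.mp (Nat.le_zero.mp hp)]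
    rfl
  | succ n ih =>
    intro p hp
    match p with
    | [] => rfl
    | v :: rest =>
      have hlen : (rest.filter (fun x => x ≠ v)).length ≤ n := by
        have := List.length_filter_le (fun x => decide (x ≠ v)) rest
        simp at hp
        omega
      by_cases hqv : q v = true
      · calc (PySem.Set.ofList (v :: rest)).filter q
            = (v :: PySem.Set.ofList (rest.filter (fun x => x ≠ v))).filter q := by
              rw [ofList_cons]
          _ = v :: (PySem.Set.ofList (rest.filter (fun x => x ≠ v))).filter q := by
              rw [List.filter_cons_of_pos hqv]
          _ = v :: PySem.Set.ofList ((rest.filter (fun x => x ≠ v)).filter q) := by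
              rw [ih _ hlen]
          _ = v :: PySem.Set.ofList ((rest.filter q).filter (fun x => x ≠ v)) := by
              rw [List.filter_filter, List.filter_filter]
              congr 2
              apply List.filter_congr
              intro x _
              exact Bool.and_comm _ _
          _ = PySem.Set.ofList (v :: rest.filter q) := by rw [ofList_cons]
          _ = PySem.Set.ofList ((v :: rest).filter q) := by
              rw [List.filter_cons_of_pos hqv]
      · calc (PySem.Set.ofList (v :: rest)).filter q
            = (v :: PySem.Set.ofList (rest.filter (fun x => x ≠ v))).filter q := by
              rw [ofList_cons]
          _ = (PySem.Set.ofList (rest.filter (fun x => x ≠ v))).filter q := by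
              rw [List.filter_cons_of_neg (by simp [hqv])]
          _ = PySem.Set.ofList ((rest.filter (fun x => x ≠ v)).filter q) := by
              rw [ih _ hlen]
          _ = PySem.Set.ofList (rest.filter q) := by
              rw [List.filter_filter]
              congr 1
              apply List.filter_congr
              intro x _
              by_cases hq : q x = true
              · by_cases hxv : x = v
                · subst hxv; exact absurd hq hqv
                · simp [hq, hxv]
              · simp only [Bool.not_eq_true] at hq
                simp [hq]
          _ = PySem.Set.ofList ((v :: rest).filter q) := by
              rw [List.filter_cons_of_neg (by simp [hqv])]

-- ---- the central aggregation lemma: unit bumps = one bump per distinct word ----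

theorem fold_unit_eq_counts (w : String) : ∀ (n : Nat) (q : List String), q.length ≤ n →
    (∀ v ∈ q, v ≠ w) → ∀ m : MT,
    q.foldl (fun m v => bumpM m (keyP w v) 1) m
    = (PySem.Set.ofList q).foldl (fun m v => bumpM m (keyP w v) (q.count v : Int)) m := by
  intro n
  induction n with
  | zero =>
    intro q hq _ m
    rw [List.length_eq_zero_iff.mp (Nat.le_zero.mp hq)]
    rfl
  | succ n ih =>
    intro q hq hw m
    match q with
    | [] => rfl
    | v :: rest =>
      have hvw : v ≠ w := hw v List.mem_cons_self
      rw [List.foldl_cons,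
        bump_fold_pull w rest (bumpM m (keyP w v) 1) (keyP w v) (bump_PM_self m (keyP w v) 1),
        addAmt_bump]
      have hfil : rest.filter (fun u => decide (keyP w u ≠ keyP w v))
          = rest.filter (fun u => decide (u ≠ v)) := by
        apply List.filter_congr
        intro u hu
        have h1 : u ≠ w := hw u (List.mem_cons_of_mem v hu)
        by_cases huv : u = v
        · subst huv; simp
        · have h2 : keyP w u ≠ keyP w v := fun hk => huv (keyP_inj w u v h1 hvw hk)
          simp [h2, huv]
      have hcnt : rest.countP (fun u => decide (keyP w u = keyP w v)) = rest.count v := by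
        have hc0 : rest.count v = rest.countP (fun u => u == v) := rfl
        rw [hc0]
        apply List.countP_congr
        intro u hu
        have h1 : u ≠ w := hw u (List.mem_cons_of_mem v hu)
        constructor
        · intro hd
          simp only [decide_eq_true_eq] at hd
          simpa using keyP_inj w u v h1 hvw hd
        · intro hd
          simp only [beq_iff_eq] at hd
          subst hd
          simp
      rw [hfil, hcnt]
      rw [ih (rest.filter (fun u => u ≠ v))
            (by
              have := List.length_filter_le (fun u => decide (u ≠ v)) rest
              simp at hq
              omega)
            (fun u hu => hw u (List.mem_cons_of_mem v (List.mem_of_mem_filter hu)))]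
      rw [ofList_cons, List.foldl_cons,
        show ((v :: rest).count v : Int) = 1 + (rest.count v : Int) from by
          rw [List.count_cons_self]; push_cast; ring]
      apply PySem.List.foldl_congr_mem
      intro acc u hu
      have humem : u ∈ rest.filter (fun x => decide (x ≠ v)) :=
        (PySem.Set.mem_ofList _ _).mp hu
      have huv : u ≠ v := by simpa using (List.of_mem_filter humem)
      congr 1
      rw [List.count_filter (by simpa using huv)]
      simp [Ne.symm huv]

-- ---- B's pass over the per-tweet count table = A's pass over earlier positions ----

theorem counts_fold_eq_pairsFold (p : List String) (w : String) (m : MT) :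
    (PySem.Dict.counter p).items.foldl (fun m vc =>
        if vc.1 ≠ w then
          if vc.1 < w then m.modify vc.1 PySem.Dict.empty (fun r => r.modify w 0 (· + vc.2))
          else m.modify w PySem.Dict.empty (fun r => r.modify vc.1 0 (· + vc.2))
        else m) m
    = pairsFold m w p := by
  rw [PySem.Dict.items_counter, List.foldl_map]
  refine Eq.trans (PySem.List.foldl_congr_mem (PySem.Set.ofList p) _
      (fun m v => if decide (v ≠ w) = true then bumpM m (keyP w v) ((p.count v : Nat) : Int)
        else m) m ?_) ?_
  · intro acc v _
    dsimp only
    by_cases hvw : v = w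
    · simp [hvw]
    · have hR : (if decide (v ≠ w) = true then bumpM acc (keyP w v) ((p.count v : Nat) : Int)
          else acc) = bumpM acc (keyP w v) ((p.count v : Nat) : Int) := by simp [hvw]
      rw [hR, if_pos (show v ≠ w from hvw)]
      rcases lt_trichotomy v w with hlt | heq | hgt
      · rw [if_pos hlt]
        unfold bumpM keyP
        rw [if_neg (not_le.mpr hlt)]
      · exact absurd heq hvw
      · rw [if_neg (not_lt.mpr (le_of_lt hgt))]
        unfold bumpM keyP
        rw [if_pos (le_of_lt hgt)]
  · rw [← List.foldl_filter, ofList_filter _ p.length p le_rfl]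
    refine Eq.trans (PySem.List.foldl_congr_mem _ _
        (fun (m : MT) v => bumpM m (keyP w v)
          (((p.filter (fun x => decide (x ≠ w))).count v : Nat) : Int)) m ?_) ?_
    · intro acc v hv
      have hvw : v ≠ w := by
        have := (PySem.Set.mem_ofList _ _).mp hv
        simpa using (List.of_mem_filter this)
      congr 1
      rw [List.count_filter (by simpa using hvw)]
    · rw [← fold_unit_eq_counts w (p.filter (fun x => decide (x ≠ w))).length _ le_rfl
          (fun v hv => by simpa using List.of_mem_filter hv) m]
      rw [List.foldl_filter]
      unfold pairsFold
      apply PySem.List.foldl_congr_mem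
      intro acc v _
      by_cases hvw : v = w <;> simp [hvw]

-- ---- per-tweet equivalence, A side ----

theorem stepA_shape (m : MT) (a b : String) :
    (if (if a ≤ b then a else b) ≠ (if a ≤ b then b else a) then
       m.modify (if a ≤ b then a else b) PySem.Dict.empty
         (fun r => r.modify (if a ≤ b then b else a) 0 (· + 1))
     else m)
    = (if b ≠ a then bumpM m (keyP a b) 1 else m) := by
  unfold bumpM keyP
  by_cases hab : a ≤ b
  · by_cases hba : b = a
    · subst hba; simp
    · have hne : a ≠ b := fun hh => hba hh.symm
      simp [hab, hba, hne]
  · have hba : b ≠ a := fun hh => hab (by rw [hh])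
    simp [hab, hba]

theorem map_range_getD {α : Type} (t : List α) (d : α) :
    ∀ (k : Nat), k ≤ t.length → (List.range k).map (fun j => t.getD j d) = t.take k := by
  intro k
  induction k with
  | zero => intro _; simp
  | succ k ih =>
    intro hk
    rw [List.range_succ, List.map_append, ih (Nat.le_of_succ_le hk)]
    have hkl : k < t.length := hk
    rw [List.take_add_one]
    simp [List.getD, List.getElem?_eq_getElem hkl]

theorem mtrGo_append_singleton (ws : List String) : ∀ (p : List String) (m : MT) (x : String),
    mtrGo p (ws ++ [x]) m = pairsFold (mtrGo p ws m) x (p ++ ws) := by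
  induction ws with
  | nil => intro p m x; simp [mtrGo]
  | cons w ws ih =>
    intro p m x
    show mtrGo (p ++ [w]) (ws ++ [x]) (pairsFold m w p) = _
    rw [ih]
    simp [mtrGo, List.append_assoc]

theorem rangeFold_mtrGo (t : List String) : ∀ m : MT,
    (List.range t.length).foldl (fun m k => pairsFold m (t.getD k "") (t.take k)) m
    = mtrGo [] t m := by
  induction t using List.reverseRecOn with
  | nil => intro m; rfl
  | append_singleton t x ih =>
    intro m
    have hlen : (t ++ [x]).length = t.length + 1 := by simp
    rw [hlen, List.range_succ, List.foldl_append]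
    have hcong : (List.range t.length).foldl
          (fun m k => pairsFold m ((t ++ [x]).getD k "") ((t ++ [x]).take k)) m
        = (List.range t.length).foldl (fun m k => pairsFold m (t.getD k "") (t.take k)) m := by
      apply PySem.List.foldl_congr_mem
      intro acc k hk
      have hk' : k < t.length := List.mem_range.mp hk
      rw [List.getD_append _ _ _ _ hk', List.take_append_of_le_length (le_of_lt hk')]
    rw [hcong, ih m]
    have hgl : (t ++ [x]).getD t.length "" = x := by
      rw [List.getD_append_right _ _ _ _ le_rfl]
      simp
    have htk : (t ++ [x]).take t.length = t := by
      rw [List.take_append_of_le_length le_rfl, List.take_length]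
    rw [List.foldl_cons, List.foldl_nil, hgl, htk, mtrGo_append_singleton]
    simp

theorem tweetA_eq (t : List String) (m : MT) :
    (PySem.List.pyRange 0 (PySem.List.len t)).foldl (fun m i =>
      (PySem.List.pyRange 0 i).foldl (fun m j =>
        let a := PySem.List.pyGetD t i ""
        let b := PySem.List.pyGetD t j ""
        let w1 := if a ≤ b then a else b
        let w2 := if a ≤ b then b else a
        if w1 ≠ w2 then m.modify w1 PySem.Dict.empty (fun r => r.modify w2 0 (· + 1)) else m) m) m
    = mtrGo [] t m := by
  simp only [PySem.List.len_eq, PySem.List.pyRange_one, List.foldl_map, sub_zero,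
    Int.toNat_natCast, zero_add, PySem.List.pyGetD_natCast]
  refine Eq.trans (PySem.List.foldl_congr_mem (List.range t.length) _
      (fun m k => pairsFold m (t.getD k "") (t.take k)) m ?_) (rangeFold_mtrGo t m)
  intro acc k hk
  have hk' : k < t.length := List.mem_range.mp hk
  show _ = pairsFold acc (t.getD k "") (t.take k)
  rw [show t.take k = (List.range k).map (fun j => t.getD j "") from
    (map_range_getD t "" k (le_of_lt hk')).symm]
  unfold pairsFold
  rw [List.foldl_map]
  apply PySem.List.foldl_congr_mem
  intro acc' j _
  exact stepA_shape acc' (t.getD k "") (t.getD j "")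

-- ---- per-tweet equivalence, B side ----

theorem tweetB_go (ws : List String) : ∀ (p : List String) (m : MT),
    (ws.foldl (fun (st : MT × PySem.Dict String Int) w =>
      (st.2.items.foldl (fun m vc =>
          if vc.1 ≠ w then
            if vc.1 < w then m.modify vc.1 PySem.Dict.empty (fun r => r.modify w 0 (· + vc.2))
            else m.modify w PySem.Dict.empty (fun r => r.modify vc.1 0 (· + vc.2))
          else m) st.1,
       st.2.insert w (st.2.getD w 0 + 1))) (m, PySem.Dict.counter p)).1 = mtrGo p ws m := by
  induction ws with
  | nil => intro p m; rfl
  | cons w ws ih =>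
    intro p m
    rw [List.foldl_cons]
    dsimp only
    rw [counts_fold_eq_pairsFold p w m]
    rw [show (PySem.Dict.counter p).insert w ((PySem.Dict.counter p).getD w 0 + 1)
        = PySem.Dict.counter (p ++ [w]) from (PySem.Dict.counter_append_singleton p w).symm]
    exact ih (p ++ [w]) (pairsFold m w p)

theorem tweetB_eq (t : List String) (m : MT) :
    (t.foldl (fun (st : MT × PySem.Dict String Int) w =>
      (st.2.items.foldl (fun m vc =>
          if vc.1 ≠ w then
            if vc.1 < w then m.modify vc.1 PySem.Dict.empty (fun r => r.modify w 0 (· + vc.2))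
            else m.modify w PySem.Dict.empty (fun r => r.modify vc.1 0 (· + vc.2))
          else m) st.1,
       st.2.insert w (st.2.getD w 0 + 1))) (m, PySem.Dict.empty)).1 = mtrGo [] t m :=
  tweetB_go t [] m

-- ---- word_freq ----

theorem foldl_flatMap_eq {α β : Type} (L : List (List α)) (f : β → α → β) : ∀ (i : β),
    L.foldl (fun acc t => t.foldl f acc) i = (L.flatMap (fun t => t)).foldl f i := by
  induction L with
  | nil => intro i; rfl
  | cons t L ih =>
    intro i
    simp only [List.foldl_cons, List.flatMap_cons, List.foldl_append]
    exact ih _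

theorem wf_eq (tweets : List (List String)) :
    tweets.foldl (fun wf tweet =>
      (PySem.List.pyRange 0 (PySem.List.len tweet)).foldl (fun wf i =>
        if wf.contains (PySem.List.pyGetD tweet i "") then
          wf.insert (PySem.List.pyGetD tweet i "") (wf.getD (PySem.List.pyGetD tweet i "") 0 + 1)
        else
          wf.insert (PySem.List.pyGetD tweet i "") 1) wf) PySem.Dict.empty
    = PySem.Dict.counter (tweets.flatMap (fun t => t)) := by
  have hbody : ∀ (tweet : List String) (wf : PySem.Dict String Int),
      (PySem.List.pyRange 0 (PySem.List.len tweet)).foldl (fun wf i =>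
        if wf.contains (PySem.List.pyGetD tweet i "") then
          wf.insert (PySem.List.pyGetD tweet i "") (wf.getD (PySem.List.pyGetD tweet i "") 0 + 1)
        else
          wf.insert (PySem.List.pyGetD tweet i "") 1) wf
      = tweet.foldl (fun wf w => wf.modify w 0 (· + 1)) wf := by
    intro tweet wf
    have h0 := PySem.List.foldl_pyRange_zero_pyGetD tweet "" (fun wf w =>
      if wf.contains w then wf.insert w (wf.getD w 0 + 1) else wf.insert w 1) wf
    refine Eq.trans h0 ?_
    apply PySem.List.foldl_congr_mem
    intro acc w _
    by_cases hc : acc.contains w = true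
    · rw [if_pos hc]; rfl
    · rw [if_neg hc]
      have hc' : acc.contains w = false := by
        cases hx : acc.contains w
        · rfl
        · exact absurd hx hc
      show acc.insert w 1 = acc.insert w (acc.getD w 0 + 1)
      rw [dict_getD_of_not_contains acc w 0 hc']
      norm_num
  calc tweets.foldl (fun wf tweet =>
        (PySem.List.pyRange 0 (PySem.List.len tweet)).foldl (fun wf i =>
          if wf.contains (PySem.List.pyGetD tweet i "") then
            wf.insert (PySem.List.pyGetD tweet i "") (wf.getD (PySem.List.pyGetD tweet i "") 0 + 1)
          else
            wf.insert (PySem.List.pyGetD tweet i "") 1) wf) PySem.Dict.empty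
      = tweets.foldl (fun (wf : PySem.Dict String Int) tweet =>
          tweet.foldl (fun wf w => wf.modify w 0 (· + 1)) wf)
          (PySem.Dict.empty : PySem.Dict String Int) := by
        apply PySem.List.foldl_congr_mem
        intro acc t _
        exact hbody t acc
    _ = (tweets.flatMap (fun t => t)).foldl
          (fun (wf : PySem.Dict String Int) w => wf.modify w 0 (· + 1))
          (PySem.Dict.empty : PySem.Dict String Int) := foldl_flatMap_eq tweets _ _
    _ = PySem.Dict.counter (tweets.flatMap (fun t => t)) :=
          (PySem.Dict.counter_eq_foldl _).symm

-- ---- word_mtr ----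

theorem mtr_eq (tweets : List (List String)) :
    tweets.foldl (fun m tweet =>
      (PySem.List.pyRange 0 (PySem.List.len tweet)).foldl (fun m i =>
        (PySem.List.pyRange 0 i).foldl (fun m j =>
          let a := PySem.List.pyGetD tweet i ""
          let b := PySem.List.pyGetD tweet j ""
          let w1 := if a ≤ b then a else b
          let w2 := if a ≤ b then b else a
          if w1 ≠ w2 then m.modify w1 PySem.Dict.empty (fun r => r.modify w2 0 (· + 1)) else m) m) m)
      PySem.Dict.empty
    = tweets.foldl (fun m tweet =>
      (tweet.foldl (fun (st : MT × PySem.Dict String Int) w =>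
        (st.2.items.foldl (fun m vc =>
            if vc.1 ≠ w then
              if vc.1 < w then m.modify vc.1 PySem.Dict.empty (fun r => r.modify w 0 (· + vc.2))
              else m.modify w PySem.Dict.empty (fun r => r.modify vc.1 0 (· + vc.2))
            else m) st.1,
         st.2.insert w (st.2.getD w 0 + 1))) (m, PySem.Dict.empty)).1) PySem.Dict.empty := by
  apply PySem.List.foldl_congr_mem
  intro acc t _
  exact (tweetA_eq t acc).trans (tweetB_eq t acc).symm

-- ===== VERDICT (by name: the statement is the Claim_ definition above) =====
theorem build_frequencies_spec : Claim_equal_build_frequencies := by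
  intro tweets _
  show build_frequencies tweets = build_frequencies_alt tweets
  unfold build_frequencies build_frequencies_alt
  rw [wf_eq tweets, mtr_eq tweets]
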